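-- pv_equiv track=rewrite | github.com/sjking/aoc2020 | 06/solution.py | count_group
-- ===== SOURCE A (Python) =====
-- alphabet = list("abcdefghijklmnopqrstuvwxyz")
--
-- def count_group(answers):
--     if len(answers) == 0:
--         return 0
--     qs = set(alphabet)
--     for line in answers:
--         for c in line:
--             if c in qs:
--                 qs.remove(c)
--     return 26 - len(qs)
-- ===== SOURCE B (Python) =====
-- def count_group(answers):
--     total = 0
--     for c in "abcdefghijklmnopqrstuvwxyz":
--         if any(c in line for line in answers):
--             total += 1
--     return total
-- ===== Notes on version B (the rewrite author's own statement) =====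
-- stated objective: alternative
-- what changed: B inverts the traversal: it loops over the 26 alphabet letters and counts those that occur in some line (a per-letter membership scan, no set at all), instead of A's single pass over the input characters that deletes seen letters from a full alphabet set and subtracts the remainder from 26.
import Mathlib
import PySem

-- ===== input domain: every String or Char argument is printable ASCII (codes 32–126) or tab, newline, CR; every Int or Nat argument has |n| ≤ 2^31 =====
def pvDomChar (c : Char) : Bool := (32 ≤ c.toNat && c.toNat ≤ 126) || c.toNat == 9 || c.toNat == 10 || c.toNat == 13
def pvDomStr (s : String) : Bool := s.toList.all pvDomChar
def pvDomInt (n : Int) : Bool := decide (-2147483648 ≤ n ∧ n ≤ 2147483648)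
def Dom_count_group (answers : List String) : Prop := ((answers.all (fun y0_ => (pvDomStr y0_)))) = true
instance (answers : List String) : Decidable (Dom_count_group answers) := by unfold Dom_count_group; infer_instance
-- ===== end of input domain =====

-- B loops over the 26 alphabet letters and counts those occurring in some line (per-letter
-- membership scans, no set), instead of A's pass over the input deleting seen letters from a
-- full alphabet set and subtracting the remainder from 26. Objective: alternative.

-- ===== PORT A =====
def pvAlphabet : List Char := "abcdefghijklmnopqrstuvwxyz".toList

def count_group (answers : List String) : Int :=
  if answers.length = 0 then 0
  else
    let qs := answers.foldl
      (fun qs line => line.toList.foldl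
        (fun qs c => if PySem.Set.contains qs c then (PySem.Set.remove? qs c).getD qs else qs) qs)
      (PySem.Set.ofList pvAlphabet)
    26 - PySem.Set.len qs

-- ===== PORT B =====
def count_group_alt (answers : List String) : Int :=
  pvAlphabet.foldl
    (fun total c => if answers.any (fun line => line.toList.contains c) then total + 1 else total)
    0

-- ===== PRECONDITION & SPEC =====
def Spec_count_group (answers : List String) (out : Int) : Prop := out = count_group_alt answers
instance (answers : List String) (out : Int) : Decidable (Spec_count_group answers out) := by unfold Spec_count_group; infer_instance

-- ===== CLAIM (what is proved, stated in full; the proofs are below) =====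
def Claim_equal_count_group : Prop := ∀ (answers : List String), Dom_count_group answers → Spec_count_group answers (count_group answers)

-- ===== LEMMAS AND PROOFS =====

-- A's elimination loop over one character list is a filter of the state.
theorem pvElimStep (cs : List Char) : ∀ (qs : List Char),
    cs.foldl (fun qs c => if PySem.Set.contains qs c then (PySem.Set.remove? qs c).getD qs else qs) qs
      = qs.filter (fun a => decide (a ∉ cs)) := by
  induction cs with
  | nil => intro qs; simp
  | cons c cs ih =>
    intro qs
    have hstep : (if PySem.Set.contains qs c then (PySem.Set.remove? qs c).getD qs else qs)
        = qs.filter (fun a => decide (a ≠ c)) := by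
      by_cases hc : c ∈ qs
      · rw [(PySem.Set.contains_iff qs c).2 hc]
        simp only [PySem.Set.remove?_of_mem hc, Option.getD_some, PySem.Set.discard]
        apply List.filter_congr; intro a _
        simp [beq_eq_decide]
      · have hcf : PySem.Set.contains qs c = false := by
          simpa using (fun hh => hc ((PySem.Set.contains_iff qs c).1 hh))
        rw [hcf]
        simp only [Bool.false_eq_true, if_false]
        exact (List.filter_eq_self.2 (fun a ha => by
          simp only [decide_eq_true_eq]; rintro rfl; exact hc ha)).symm
    rw [List.foldl_cons, hstep, ih, List.filter_filter]
    apply List.filter_congr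
    intro a _
    simp [Bool.and_comm, not_or]

-- A's per-line filters compose into one filter over the concatenation of all lines
theorem pvFold (answers : List String) : ∀ (qs : List Char),
    answers.foldl (fun qs line => qs.filter (fun a => decide (a ∉ line.toList))) qs
      = qs.filter (fun a => decide (a ∉ answers.flatMap String.toList)) := by
  induction answers with
  | nil => intro qs; simp
  | cons x xs ih =>
    intro qs
    rw [List.foldl_cons, ih, List.filter_filter]
    apply List.filter_congr
    intro a _
    simp [Bool.and_comm, not_or]

-- B's foldl is a countP of its predicate.
theorem pvFoldCount (p : Char → Bool) (l : List Char) : ∀ (n : Int),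
    l.foldl (fun total c => if p c then total + 1 else total) n = n + (l.countP p : Int) := by
  induction l with
  | nil => intro n; simp
  | cons c cs ih =>
    intro n
    by_cases hc : p c = true
    · simp [List.foldl_cons, hc, ih]; ring
    · simp [List.foldl_cons, hc, ih]

-- B's predicate tests membership in the concatenation of all lines.
theorem pvAnyMem (answers : List String) (c : Char) :
    (answers.any (fun line => line.toList.contains c))
      = decide (c ∈ answers.flatMap String.toList) := by
  simp only [List.contains_eq_mem, List.mem_flatMap]
  rw [Bool.eq_iff_iff]
  simp [List.any_eq_true]

-- The two counting schemes agree: 26 minus the unseen letters = the count of seen letters.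
theorem pvCounts (cs : List Char) :
    (26 : Int) - ((pvAlphabet.filter (fun a => decide (a ∉ cs))).length : Int)
      = ((pvAlphabet.countP (fun a => decide (a ∈ cs))) : Int) := by
  have h : pvAlphabet.countP (fun a => decide (a ∈ cs))
        + pvAlphabet.countP (fun a => decide (a ∉ cs)) = 26 := by
    have := List.length_eq_countP_add_countP (l := pvAlphabet) (p := fun a => decide (a ∈ cs))
    have hl : pvAlphabet.length = 26 := by decide
    have hc : pvAlphabet.countP (fun a => ¬decide (a ∈ cs)) 
        = pvAlphabet.countP (fun a => decide (a ∉ cs)) := by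
      apply List.countP_congr; intro a _; simp
    omega
  have hf : (pvAlphabet.filter (fun a => decide (a ∉ cs))).length
      = pvAlphabet.countP (fun a => decide (a ∉ cs)) := List.countP_eq_length_filter.symm
  omega

-- ===== VERDICT (by name: the statement is the Claim_ definition above) =====
theorem count_group_spec : Claim_equal_count_group := by
  intro answers _
  unfold Spec_count_group count_group count_group_alt
  have hofl : PySem.Set.ofList pvAlphabet = pvAlphabet := by decide
  simp only [pvElimStep, pvFold, hofl]
  have hB : pvAlphabet.foldl
      (fun total c => if answers.any (fun line => line.toList.contains c) then total + 1 else total)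
      0 = ((pvAlphabet.countP (fun a => decide (a ∈ answers.flatMap String.toList))) : Int) := by
    have := pvFoldCount (fun c => answers.any (fun line => line.toList.contains c)) pvAlphabet 0
    rw [this]
    have hp : pvAlphabet.countP (fun c => answers.any (fun line => line.toList.contains c))
        = pvAlphabet.countP (fun a => decide (a ∈ answers.flatMap String.toList)) := by
      apply List.countP_congr; intro a _; rw [pvAnyMem]
    rw [hp]; ring
  rw [hB]
  by_cases hlen : answers.length = 0
  · have : answers = [] := List.length_eq_zero_iff.1 hlen
    subst this
    decide
  · rw [if_neg hlen]
    simp only [PySem.Set.len]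
    exact pvCounts _
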